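-- pv_equiv track=rewrite | github.com/vulnz/dominator | detectors/backup_finder_detector.py | _determine_file_type
-- ===== SOURCE A (Python) =====
-- from typing import Tuple, List
--
-- def _determine_file_type(patterns: List[str], response_text: str) -> str:
--     """Determine the type of backup file based on patterns"""
--     response_lower = response_text.lower()
--
--     # PHP file
--     if any(php in pattern for pattern in patterns for php in ['php', '$_', 'mysql_', 'mysqli_']):
--         return "php_source"
--
--     # ASP/ASP.NET file
--     if any(asp in pattern for pattern in patterns for asp in ['<%', 'Response.', 'Request.', 'Server.']):
--         return "asp_source"
--
--     # JSP file
--     if any(jsp in pattern for pattern in patterns for jsp in ['<%@', 'request.', 'session.']):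
--         return "jsp_source"
--
--     # JavaScript file
--     if any(js in pattern for pattern in patterns for js in ['function', 'var ', 'document.', 'window.']):
--         return "javascript_source"
--
--     # Configuration file
--     if any(conf in pattern for pattern in patterns for conf in ['database', 'password', 'username', 'ServerRoot']):
--         return "config_file"
--
--     # SQL dump
--     if any(sql in pattern for pattern in patterns for sql in ['CREATE', 'INSERT', 'DROP', 'dump']):
--         return "sql_dump"
--
--     # Log file
--     if any(log in pattern for pattern in patterns for log in ['error', 'warn', 'info', 'GET ', 'POST ']):
--         return "log_file"
--
--     return "unknown_backup"
-- ===== SOURCE B (Python) =====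
-- from typing import List
--
-- _KEYWORDS = [
--     ['php', '$_', 'mysql_', 'mysqli_'],
--     ['<%', 'Response.', 'Request.', 'Server.'],
--     ['<%@', 'request.', 'session.'],
--     ['function', 'var ', 'document.', 'window.'],
--     ['database', 'password', 'username', 'ServerRoot'],
--     ['CREATE', 'INSERT', 'DROP', 'dump'],
--     ['error', 'warn', 'info', 'GET ', 'POST '],
-- ]
-- _LABELS = ["php_source", "asp_source", "jsp_source", "javascript_source",
--            "config_file", "sql_dump", "log_file"]
--
-- def _determine_file_type(patterns: List[str], response_text: str) -> str:
--     response_text.lower()  # kept from the original (result unused there too)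
--     # Single pass over the patterns, keeping the smallest (highest-priority)
--     # rule index matched so far; the inner scan breaks once it cannot improve.
--     best = len(_KEYWORDS)
--     for pattern in patterns:
--         for i, keywords in enumerate(_KEYWORDS):
--             if best <= i:
--                 break
--             if any(kw in pattern for kw in keywords):
--                 best = i
--                 break
--     return _LABELS[best] if best < len(_KEYWORDS) else "unknown_backup"
-- ===== Notes on version B (the rewrite author's own statement) =====
-- stated objective: alternative
-- what changed: A makes seven rule-major passes over the patterns (one per file type, first hit returns); B makes a single pattern-major pass maintaining a minimum-priority accumulator (best matched rule index, with an early break once a pattern cannot improve it) and maps the final index to its label.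
import Mathlib
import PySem

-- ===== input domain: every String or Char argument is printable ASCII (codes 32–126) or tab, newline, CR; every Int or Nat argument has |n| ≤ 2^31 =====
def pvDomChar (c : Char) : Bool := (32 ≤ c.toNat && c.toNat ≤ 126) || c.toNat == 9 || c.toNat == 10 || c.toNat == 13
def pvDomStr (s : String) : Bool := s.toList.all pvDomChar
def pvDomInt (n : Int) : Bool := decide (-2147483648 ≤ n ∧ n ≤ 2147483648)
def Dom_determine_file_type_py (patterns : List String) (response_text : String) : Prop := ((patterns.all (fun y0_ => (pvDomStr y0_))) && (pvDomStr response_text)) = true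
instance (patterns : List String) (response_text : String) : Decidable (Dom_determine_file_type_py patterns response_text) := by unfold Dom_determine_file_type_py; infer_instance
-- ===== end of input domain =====

-- B replaces A's seven rule-major scans of the patterns by one pattern-major pass keeping the best (minimum) matched rule index; objective: alternative.


-- ===== PORT A =====
-- Port of A: response_lower computed (unused, as in Python), then seven unrolled branches, each scanning all patterns.
def determine_file_type_py (patterns : List String) (response_text : String) : String :=
  let _response_lower := PySem.Str.lower response_text
  if patterns.any (fun pattern => ["php", "$_", "mysql_", "mysqli_"].any (fun php => PySem.Str.isIn php pattern)) then "php_source"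
  else if patterns.any (fun pattern => ["<%", "Response.", "Request.", "Server."].any (fun asp => PySem.Str.isIn asp pattern)) then "asp_source"
  else if patterns.any (fun pattern => ["<%@", "request.", "session."].any (fun jsp => PySem.Str.isIn jsp pattern)) then "jsp_source"
  else if patterns.any (fun pattern => ["function", "var ", "document.", "window."].any (fun js => PySem.Str.isIn js pattern)) then "javascript_source"
  else if patterns.any (fun pattern => ["database", "password", "username", "ServerRoot"].any (fun conf => PySem.Str.isIn conf pattern)) then "config_file"
  else if patterns.any (fun pattern => ["CREATE", "INSERT", "DROP", "dump"].any (fun sql => PySem.Str.isIn sql pattern)) then "sql_dump"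
  else if patterns.any (fun pattern => ["error", "warn", "info", "GET ", "POST "].any (fun log => PySem.Str.isIn log pattern)) then "log_file"
  else "unknown_backup"

-- ===== PORT B =====
-- Port of B: single pass over patterns, accumulator = smallest matched rule index so far.
def pvKeywords : List (List String) :=
  [ ["php", "$_", "mysql_", "mysqli_"],
    ["<%", "Response.", "Request.", "Server."],
    ["<%@", "request.", "session."],
    ["function", "var ", "document.", "window."],
    ["database", "password", "username", "ServerRoot"],
    ["CREATE", "INSERT", "DROP", "dump"],
    ["error", "warn", "info", "GET ", "POST "] ]

def pvLabels : List String :=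
  ["php_source", "asp_source", "jsp_source", "javascript_source", "config_file", "sql_dump", "log_file"]

-- inner loop of Source B: `for i, keywords in enumerate(_KEYWORDS): if best <= i: break; if any(...): best = i; break`
-- `any(kw in pattern for kw in keywords)`
def pvMatches (kws : List String) (p : String) : Bool := kws.any (fun kw => PySem.Str.isIn kw p)

def pvScan (pattern : String) : List (List String) → Nat → Nat → Nat
  | [], _, best => best
  | kws :: rest, i, best =>
      if best ≤ i then best
      else if pvMatches kws pattern then i
      else pvScan pattern rest (i + 1) best

def determine_file_type_py_alt (patterns : List String) (response_text : String) : String :=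
  let _ := PySem.Str.lower response_text
  let best := patterns.foldl (fun best pattern => pvScan pattern pvKeywords 0 best) pvKeywords.length
  -- `_LABELS[best]` is in range exactly when best < len(_KEYWORDS), as the guard checks
  if best < pvKeywords.length then pvLabels.getD best "unknown_backup" else "unknown_backup"

-- ===== PRECONDITION & SPEC =====
def Spec_determine_file_type_py (patterns : List String) (response_text : String) (out : String) : Prop := out = determine_file_type_py_alt patterns response_text
instance (patterns : List String) (response_text : String) (out : String) : Decidable (Spec_determine_file_type_py patterns response_text out) := by unfold Spec_determine_file_type_py; infer_instance

-- ===== CLAIM =====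
def Claim_equal_determine_file_type_py : Prop := ∀ (patterns : List String) (response_text : String), Dom_determine_file_type_py patterns response_text → Spec_determine_file_type_py patterns response_text (determine_file_type_py patterns response_text)

-- ===== LEMMAS AND PROOFS =====

-- index of the first `true` in a boolean list (list length if none)
def pvFirstTrue : List Bool → Nat
  | [] => 0
  | b :: bs => if b then 0 else pvFirstTrue bs + 1

def pvVec (p : String) : List Bool := pvKeywords.map (fun kws => pvMatches kws p)

def pvAnyVec (ps : List String) : List Bool := pvKeywords.map (fun kws => ps.any (fun p => pvMatches kws p))

lemma pvFirstTrue_le (bs : List Bool) : pvFirstTrue bs ≤ bs.length := by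
  induction bs with
  | nil => simp [pvFirstTrue]
  | cons b bs ih => by_cases h : b = true <;> simp [pvFirstTrue, h] <;> omega


lemma pvFirstTrue_or (bs cs : List Bool) (h : bs.length = cs.length) :
    pvFirstTrue (List.zipWith (· || ·) bs cs) = min (pvFirstTrue bs) (pvFirstTrue cs) := by
  induction bs generalizing cs with
  | nil => cases cs with
    | nil => simp [pvFirstTrue]
    | cons c cs => simp at h
  | cons b bs ih =>
    cases cs with
    | nil => simp at h
    | cons c cs =>
      simp at h
      by_cases hb : b = true <;> by_cases hc : c = true <;>
        simp [pvFirstTrue, hb, hc, ih cs h] <;> omega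

lemma pvAnyVec_cons (p : String) (ps : List String) :
    pvAnyVec (p :: ps) = List.zipWith (· || ·) (pvVec p) (pvAnyVec ps) := by
  simp [pvAnyVec, pvVec, pvKeywords, List.any_cons]

-- the inner loop computes min best (i + index of the first matched rule), given best ≤ i + #rules
lemma pvScan_gen (p : String) (rules : List (List String)) :
    ∀ (i best : Nat), best ≤ i + rules.length →
      pvScan p rules i best = min best (i + pvFirstTrue (rules.map (fun kws => pvMatches kws p))) := by
  induction rules with
  | nil => intro i best h; simp only [pvScan, List.map_nil, pvFirstTrue]; simp at h; omega
  | cons kws rest ih =>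
    intro i best h
    simp only [pvScan, List.map_cons, pvFirstTrue, List.length_cons] at *
    by_cases hb : best ≤ i <;> by_cases hm : pvMatches kws p = true <;>
      simp only [hb, hm, if_true, if_false, if_pos, Bool.false_eq_true] <;>
      first
        | omega
        | (rw [ih (i + 1) best (by omega)]; omega)

lemma pvScan_eq_min (p : String) (best : Nat) (hb : best ≤ 7) :
    pvScan p pvKeywords 0 best = min best (pvFirstTrue (pvVec p)) := by
  have h := pvScan_gen p pvKeywords 0 best (by simp [pvKeywords]; omega)
  simpa [pvVec] using h

lemma pvFold_eq (ps : List String) : ∀ best, best ≤ 7 →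
    ps.foldl (fun best pattern => pvScan pattern pvKeywords 0 best) best
      = min best (pvFirstTrue (pvAnyVec ps)) := by
  induction ps with
  | nil =>
    intro best hb
    have : pvFirstTrue (pvAnyVec []) = 7 := by simp [pvAnyVec, pvKeywords, pvFirstTrue]
    simp [this]; omega
  | cons p ps ih =>
    intro best hb
    have hlen : (pvVec p).length = (pvAnyVec ps).length := by simp [pvVec, pvAnyVec]
    rw [List.foldl_cons, pvScan_eq_min p best hb, ih _ (by omega), pvAnyVec_cons,
      pvFirstTrue_or _ _ hlen]
    omega

-- a 7-way if/else chain of labels is lookup by the index of the first true condition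
lemma pvChain : ∀ (b0 b1 b2 b3 b4 b5 b6 : Bool),
    (if b0 then "php_source"
     else if b1 then "asp_source"
     else if b2 then "jsp_source"
     else if b3 then "javascript_source"
     else if b4 then "config_file"
     else if b5 then "sql_dump"
     else if b6 then "log_file"
     else "unknown_backup")
    = (if pvFirstTrue [b0, b1, b2, b3, b4, b5, b6] < 7
       then pvLabels.getD (pvFirstTrue [b0, b1, b2, b3, b4, b5, b6]) "unknown_backup"
       else "unknown_backup") := by decide

-- A is the label of the first rule some pattern matches
lemma pvA_char (ps : List String) (r : String) :
    determine_file_type_py ps r =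
      (if pvFirstTrue (pvAnyVec ps) < 7 then pvLabels.getD (pvFirstTrue (pvAnyVec ps)) "unknown_backup"
       else "unknown_backup") := by
  simp only [determine_file_type_py, pvAnyVec, pvKeywords, List.map_cons, List.map_nil, pvMatches]
  exact pvChain _ _ _ _ _ _ _

-- ===== VERDICT =====
theorem determine_file_type_py_spec : Claim_equal_determine_file_type_py := by
  intro patterns response_text _
  unfold Spec_determine_file_type_py determine_file_type_py_alt
  have h7 : pvKeywords.length = 7 := by simp [pvKeywords]
  have hle : pvFirstTrue (pvAnyVec patterns) ≤ 7 := by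
    have := pvFirstTrue_le (pvAnyVec patterns); simpa [pvAnyVec, pvKeywords] using this
  rw [pvA_char]
  simp only [h7, pvFold_eq patterns 7 (by omega)]
  have : min 7 (pvFirstTrue (pvAnyVec patterns)) = pvFirstTrue (pvAnyVec patterns) := by omega
  rw [this]
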